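-- pv_equiv track=rewrite | github.com/marcotcr/pyformlang | pyformlang/regular_expression/regex.py | remove_extreme_parenthesis
-- ===== SOURCE A (Python) =====
-- from typing import Iterable
--
-- def remove_extreme_parenthesis(value_l: Iterable[str]) -> Iterable[str]:
--     """ Remove useless extreme parenthesis """
--     if value_l[0] != "(":
--         return value_l
--     counter = 0
--     pos = 0
--     for value in value_l:
--         if value == "(":
--             counter += 1
--         elif value == ")":
--             counter -= 1
--         if counter == 0 and pos == len(value_l) - 1:
--             return remove_extreme_parenthesis(value_l[1:-1])
--         elif counter == 0:
--             break
--         pos += 1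
--     return value_l
-- ===== SOURCE B (Python) =====
-- def remove_extreme_parenthesis(value_l):
--     """ Remove useless extreme parenthesis (one pass + one slice) """
--     n = len(value_l)
--     # length of the leading run of "(" and of the trailing run of ")"
--     p = 0
--     while p < n and value_l[p] == "(":
--         p += 1
--     q = 0
--     while q < n and value_l[n - 1 - q] == ")":
--         q += 1
--     # running balance, and its minimum over the part between the two runs
--     balance = 0
--     m = n
--     for i, v in enumerate(value_l):
--         if v == "(":
--             balance += 1
--         elif v == ")":
--             balance -= 1
--         if p <= i < n - q:
--             m = min(m, balance)
--     if balance != 0 or m <= 0: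
--         # unbalanced, or an enclosing "(" closes before the end: nothing to strip
--         return value_l
--     k = min(p, q, m)
--     return value_l[k:n - k]
-- ===== Notes on version B (the rewrite author's own statement) =====
-- stated objective: alternative
-- what changed: A peels one enclosing layer at a time, rescanning and reslicing the list per layer and recursing; B computes the leading '(' run, the trailing ')' run and the minimum running balance between them in one pass, takes their minimum as the number of strippable layers, and removes them all with a single slice; Pre_ excludes only the perfectly nested pure-parenthesis lists (including the empty list) on which A's recursion reaches value_l[0] on an empty list and raises IndexError.
-- outside the precondition, e.g. on remove_extreme_parenthesis([]): A raises IndexError, B returns []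
import Mathlib
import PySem

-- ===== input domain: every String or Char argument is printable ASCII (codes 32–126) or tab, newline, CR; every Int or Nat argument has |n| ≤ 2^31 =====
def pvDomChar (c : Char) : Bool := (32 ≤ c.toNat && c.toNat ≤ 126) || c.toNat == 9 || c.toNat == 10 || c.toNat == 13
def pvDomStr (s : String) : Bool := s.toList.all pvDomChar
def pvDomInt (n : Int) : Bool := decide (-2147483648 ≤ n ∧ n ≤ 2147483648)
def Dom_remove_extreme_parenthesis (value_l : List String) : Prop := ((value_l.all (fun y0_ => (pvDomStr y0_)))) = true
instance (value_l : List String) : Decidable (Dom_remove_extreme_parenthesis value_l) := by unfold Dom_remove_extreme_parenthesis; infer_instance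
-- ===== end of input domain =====

-- B replaces A's "strip one layer, reslice and recurse" with one pass computing the leading "("
-- run, the trailing ")" run and the minimum running balance between them, then a single slice
-- (objective: alternative).

-- ===== PORT A =====
-- termination helper for A's recursion on value_l[1:-1]
theorem pvSliceShrink (l : List String) (h : l ≠ []) :
    (PySem.List.slice l (some 1) (some (-1))).length < l.length := by
  rw [PySem.List.length_slice]
  have h1 : PySem.List.clampIdx l.length (-1) = l.length - 1 := by simp
  have h2 : PySem.List.clampIdx l.length 1 = min 1 l.length := by
    have := PySem.List.clampIdx_natCast (n := l.length) (k := 1)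
    simpa using this
  have h0 : 0 < l.length := List.length_pos_iff.mpr h
  rw [h1, h2]; omega

-- A's inner for-loop: true ⟺ it reaches 'counter == 0 and pos == len(value_l) - 1' (strip and recurse)
def pvLoopA (rest : List String) (counter pos n : Int) : Bool :=
  match rest with
  | [] => false
  | v :: rs =>
    let c := if v = "(" then counter + 1 else if v = ")" then counter - 1 else counter
    if c = 0 ∧ pos = n - 1 then true
    else if c = 0 then false
    else pvLoopA rs c (pos + 1) n

def remove_extreme_parenthesis (value_l : List String) : List String :=
  match h : PySem.List.pyGet? value_l 0 with
  | none => value_l   -- Python raises IndexError here (value_l[0] on []); excluded by Pre_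
  | some v =>
    if v ≠ "(" then value_l
    else if pvLoopA value_l 0 0 value_l.length then
      remove_extreme_parenthesis (PySem.List.slice value_l (some 1) (some (-1)))
    else value_l
termination_by value_l.length
decreasing_by
  have hv : value_l ≠ [] := by
    intro e; rw [e] at h; simp [PySem.List.pyGet?] at h
  exact pvSliceShrink value_l hv

-- ===== PORT B =====
-- B's leading-run while loop: length of the leading run of c
def pvRun (c : String) : List String → Nat
  | [] => 0
  | v :: rs => if v = c then pvRun c rs + 1 else 0

-- B's for loop: running balance, and its minimum over positions i with p ≤ i < e
def pvScanM : List String → Int → Int → Int → Int → Int → Int × Int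
  | [], _, _, _, bal, m => (bal, m)
  | v :: rs, i, p, e, bal, m =>
    let b := if v = "(" then bal + 1 else if v = ")" then bal - 1 else bal
    let m' := if p ≤ i ∧ i < e then min m b else m
    pvScanM rs (i + 1) p e b m'

def remove_extreme_parenthesis_alt (value_l : List String) : List String :=
  let n : Int := value_l.length
  let p : Int := (pvRun "(" value_l : Nat)
  let q : Int := (pvRun ")" value_l.reverse : Nat)
  let r := pvScanM value_l 0 p (n - q) 0 n
  if r.1 ≠ 0 ∨ r.2 ≤ 0 then value_l
  else
    let k := min p (min q r.2)
    PySem.List.slice value_l (some k) (some (n - k))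

-- ===== PRECONDITION & SPEC =====
-- A raises IndexError exactly on [] and on the perfectly nested pure-parenthesis lists
-- ["("]*k ++ [")"]*k (its recursion strips every layer and reaches value_l[0] on the empty
-- list); Pre_ excludes exactly those inputs.
def Pre_remove_extreme_parenthesis (value_l : List String) : Prop :=
  ¬ (value_l.length % 2 = 0 ∧
     value_l = List.replicate (value_l.length / 2) "(" ++ List.replicate (value_l.length / 2) ")")
instance (value_l : List String) : Decidable (Pre_remove_extreme_parenthesis value_l) := by
  unfold Pre_remove_extreme_parenthesis; infer_instance

def pvWitness_remove_extreme_parenthesis : List String := ["(", "a", ")"]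

def Spec_remove_extreme_parenthesis (value_l : List String) (out : List String) : Prop :=
  out = remove_extreme_parenthesis_alt value_l
instance (value_l : List String) (out : List String) : Decidable (Spec_remove_extreme_parenthesis value_l out) := by
  unfold Spec_remove_extreme_parenthesis; infer_instance

-- ===== CLAIM (what is proved, stated in full; the proofs are below) =====
def Claim_equal_remove_extreme_parenthesis : Prop :=
  ∀ (value_l : List String), Dom_remove_extreme_parenthesis value_l →
    Pre_remove_extreme_parenthesis value_l →
    Spec_remove_extreme_parenthesis value_l (remove_extreme_parenthesis value_l)

-- ===== LEMMAS AND PROOFS =====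

-- the ±1 step of both loops, as a value
def pvD (v : String) : Int := if v = "(" then 1 else if v = ")" then -1 else 0

theorem pvStep_eq (v : String) (b : Int) :
    (if v = "(" then b + 1 else if v = ")" then b - 1 else b) = b + pvD v := by
  unfold pvD; split_ifs <;> ring

-- total balance of a list
def pvBal (l : List String) : Int := (l.map pvD).sum

theorem pvBal_nil : pvBal [] = 0 := rfl
theorem pvBal_cons (v : String) (l : List String) : pvBal (v :: l) = pvD v + pvBal l := by
  simp [pvBal]
theorem pvBal_append (xs ys : List String) : pvBal (xs ++ ys) = pvBal xs + pvBal ys := by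
  simp [pvBal]

theorem pvD_bounds (v : String) : -1 ≤ pvD v ∧ pvD v ≤ 1 := by
  unfold pvD; split_ifs <;> omega

theorem pvD_close (v : String) (h : pvD v ≤ -1) : v = ")" := by
  unfold pvD at h; split_ifs at h with h1 h2
  · omega
  · exact h2
  · omega

-- one-step unfolding equations in pvD form
theorem pvLoopA_cons (v : String) (rs : List String) (counter pos n : Int) :
    pvLoopA (v :: rs) counter pos n =
      (if counter + pvD v = 0 ∧ pos = n - 1 then true
       else if counter + pvD v = 0 then false
       else pvLoopA rs (counter + pvD v) (pos + 1) n) := by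
  simp only [pvLoopA, pvStep_eq]

theorem pvScanM_cons (v : String) (rs : List String) (i p e bal m : Int) :
    pvScanM (v :: rs) i p e bal m =
      pvScanM rs (i + 1) p e (bal + pvD v)
        (if p ≤ i ∧ i < e then min m (bal + pvD v) else m) := by
  simp only [pvScanM, pvStep_eq]

-- first component of the scan = accumulated balance
theorem pvScanM_fst (rest : List String) :
    ∀ (i p e b m : Int), (pvScanM rest i p e b m).1 = b + pvBal rest := by
  induction rest with
  | nil => intro i p e b m; simp [pvScanM, pvBal_nil]
  | cons v rs ih =>
    intro i p e b m
    rw [pvScanM_cons, ih, pvBal_cons]; ring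

-- the m component only decreases
theorem pvScanM_le (rest : List String) :
    ∀ (i p e b m : Int), (pvScanM rest i p e b m).2 ≤ m := by
  induction rest with
  | nil => intro i p e b m; simp [pvScanM]
  | cons v rs ih =>
    intro i p e b m
    rw [pvScanM_cons]
    split_ifs
    · exact le_trans (ih _ _ _ _ _) (min_le_left _ _)
    · exact ih _ _ _ _ _

-- the m component is ≤ the balance at any position inside the window
theorem pvScanM_le_at (rest : List String) :
    ∀ (j : Nat) (i p e b m : Int), j < rest.length → p ≤ i + j → i + j < e →
      (pvScanM rest i p e b m).2 ≤ b + pvBal (rest.take (j + 1)) := by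
  induction rest with
  | nil => intro j i p e b m hj; simp at hj
  | cons v rs ih =>
    intro j i p e b m hj h1 h2
    rw [pvScanM_cons]
    cases j with
    | zero =>
      simp only [Nat.cast_zero, add_zero] at h1 h2
      rw [if_pos ⟨h1, h2⟩]
      calc (pvScanM rs (i+1) p e (b + pvD v) (min m (b + pvD v))).2
          ≤ min m (b + pvD v) := pvScanM_le _ _ _ _ _ _
        _ ≤ b + pvD v := min_le_right _ _
        _ = b + pvBal ((v :: rs).take 1) := by simp [pvBal_cons, pvBal_nil]
    | succ j' =>
      have := ih j' (i+1) p e (b + pvD v) (if p ≤ i ∧ i < e then min m (b + pvD v) else m)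
        (by simpa using Nat.lt_of_succ_lt_succ hj) (by push_cast at h1 ⊢; omega) (by push_cast at h2 ⊢; omega)
      calc (pvScanM rs (i+1) p e (b + pvD v) _).2
          ≤ (b + pvD v) + pvBal (rs.take (j' + 1)) := this
        _ = b + pvBal ((v :: rs).take (j' + 1 + 1)) := by
            simp [List.take_succ_cons, pvBal_cons]; ring

-- A's loop succeeds ⟹ total balance 0 and every proper intermediate balance ≥ 1
theorem pvLoopA_true_char (rest : List String) :
    ∀ (b i n : Int), i + rest.length = n → 1 ≤ b →
      pvLoopA rest b i n = true →
      b + pvBal rest = 0 ∧ ∀ j : Nat, j + 1 < rest.length → 1 ≤ b + pvBal (rest.take (j + 1)) := by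
  induction rest with
  | nil => intro b i n _ _ h; simp [pvLoopA] at h
  | cons v rs ih =>
    intro b i n hn hb ht
    rw [pvLoopA_cons] at ht
    by_cases h0 : b + pvD v = 0
    · by_cases hpos : i = n - 1
      · have hrs : rs = [] := by
          have : rs.length = 0 := by simp only [List.length_cons] at hn; push_cast at hn; omega
          exact List.eq_nil_of_length_eq_zero this
        subst hrs
        refine ⟨by simpa [pvBal_cons, pvBal_nil] using h0, ?_⟩
        intro j hj; simp at hj
      · rw [if_neg (by tauto), if_pos h0] at ht; simp at ht
    · rw [if_neg (by tauto), if_neg h0] at ht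
      have hb' : 1 ≤ b + pvD v := by have := pvD_bounds v; omega
      have hrec := ih (b + pvD v) (i + 1) n
        (by simp only [List.length_cons] at hn; push_cast at hn ⊢; omega) hb' ht
      refine ⟨by rw [pvBal_cons]; have := hrec.1; linarith, ?_⟩
      intro j hj
      cases j with
      | zero => simpa [pvBal_cons, pvBal_nil] using hb'
      | succ j' =>
        have := hrec.2 j' (by simpa using Nat.lt_of_succ_lt_succ hj)
        calc (1:Int) ≤ (b + pvD v) + pvBal (rs.take (j' + 1)) := this
          _ = b + pvBal ((v :: rs).take (j' + 1 + 1)) := by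
              simp [List.take_succ_cons, pvBal_cons]; ring

-- A's loop fails ⟹ nonzero total balance, or the balance hits 0 before the last position
theorem pvLoopA_false_char (rs : List String) :
    ∀ (v : String) (b i n : Int), i + 1 + rs.length = n →
      pvLoopA (v :: rs) b i n = false →
      b + pvBal (v :: rs) ≠ 0 ∨
        ∃ j : Nat, j < rs.length ∧ b + pvBal ((v :: rs).take (j + 1)) = 0 := by
  induction rs with
  | nil =>
    intro v b i n hn hf
    rw [pvLoopA_cons] at hf
    have hi : i = n - 1 := by simp only [List.length_nil, Nat.cast_zero] at hn; omega
    by_cases h0 : b + pvD v = 0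
    · rw [if_pos ⟨h0, hi⟩] at hf; simp at hf
    · left; simpa [pvBal_cons, pvBal_nil] using h0
  | cons u rs' ih =>
    intro v b i n hn hf
    rw [pvLoopA_cons] at hf
    have hi : i ≠ n - 1 := by simp only [List.length_cons] at hn; push_cast at hn; omega
    by_cases h0 : b + pvD v = 0
    · right
      exact ⟨0, by simp, by simpa [pvBal_cons, pvBal_nil] using h0⟩
    · rw [if_neg (by tauto), if_neg h0] at hf
      have := ih u (b + pvD v) (i + 1) n
        (by simp only [List.length_cons] at hn ⊢; push_cast at hn ⊢; omega) hf
      rcases this with h | ⟨j, hj, hje⟩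
      · left; rw [pvBal_cons]; intro he; exact h (by linarith)
      · right
        refine ⟨j + 1, by simpa using Nat.succ_lt_succ hj, ?_⟩
        rw [List.take_succ_cons, pvBal_cons]
        linarith [hje]

-- run-length facts
theorem pvRun_le_length (c : String) (l : List String) : pvRun c l ≤ l.length := by
  induction l with
  | nil => simp [pvRun]
  | cons v rs ih => simp only [pvRun, List.length_cons]; split_ifs <;> omega

theorem pvRun_append_ne (c y : String) (hy : y ≠ c) (xs : List String) :
    pvRun c (xs ++ [y]) = pvRun c xs := by
  induction xs with
  | nil => simp [pvRun, hy]
  | cons v rs ih => simp only [List.cons_append, pvRun, ih]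

-- inside the leading "(" run the balance after position t is t+1
theorem pvRun_prefix (l : List String) :
    ∀ t : Nat, t < pvRun "(" l → pvBal (l.take (t + 1)) = t + 1 := by
  induction l with
  | nil => intro t ht; simp [pvRun] at ht
  | cons v rs ih =>
    intro t ht
    simp only [pvRun] at ht
    split_ifs at ht with hv
    · cases t with
      | zero => simp [pvBal_cons, pvBal_nil, pvD, hv]
      | succ t' =>
        rw [List.take_succ_cons, pvBal_cons, ih t' (by omega)]
        push_cast
        simp [pvD, hv]; ring
    · omega

-- the last t elements, t ≤ trailing ")" run, are all ")"
theorem pvRun_suffix (l : List String) :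
    ∀ t : Nat, t ≤ pvRun ")" l.reverse → l.drop (l.length - t) = List.replicate t ")" := by
  induction l using List.reverseRecOn with
  | nil => intro t ht; simp [pvRun] at ht; simp [ht]
  | append_singleton xs y ih =>
    intro t ht
    rw [List.reverse_append] at ht
    simp only [List.reverse_singleton, List.singleton_append, pvRun] at ht
    split_ifs at ht with hy
    · subst hy
      cases t with
      | zero => simp
      | succ t' =>
        have ht' : t' ≤ pvRun ")" xs.reverse := by omega
        have hlen : t' ≤ xs.length := le_trans ht' (by
          simpa using pvRun_le_length ")" xs.reverse)
        have : (xs ++ [")"]).length - (t' + 1) = xs.length - t' := by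
          simp only [List.length_append, List.length_cons, List.length_nil]; omega
        rw [this, List.drop_append_of_le_length (by omega), ih t' ht']
        rw [List.replicate_succ']
    · have ht0 : t = 0 := by omega
      subst ht0
      simp
-- balance of a replicate of ")"
theorem pvBal_replicate_close (t : Nat) : pvBal (List.replicate t ")") = -t := by
  induction t with
  | zero => simp [pvBal_nil]
  | succ t' ih =>
    rw [List.replicate_succ, pvBal_cons, ih, show pvD ")" = -1 by decide]
    push_cast; ring

-- B returns the input whenever the balance is nonzero or zero is hit inside the core;
-- convenient form: the head is not "(" (so p = 0), or A's loop fails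
theorem pvAlt_sliceK (l : List String)
    (hbal : (pvScanM l 0 (pvRun "(" l : Nat) ((l.length : Int) - (pvRun ")" l.reverse : Nat)) 0 l.length).1 = 0)
    (hm : 1 ≤ (pvScanM l 0 (pvRun "(" l : Nat) ((l.length : Int) - (pvRun ")" l.reverse : Nat)) 0 l.length).2) :
    remove_extreme_parenthesis_alt l =
      PySem.List.slice l
        (some (min ((pvRun "(" l : Nat) : Int) (min ((pvRun ")" l.reverse : Nat) : Int)
          (pvScanM l 0 (pvRun "(" l : Nat) ((l.length : Int) - (pvRun ")" l.reverse : Nat)) 0 l.length).2)))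
        (some ((l.length : Int) - min ((pvRun "(" l : Nat) : Int) (min ((pvRun ")" l.reverse : Nat) : Int)
          (pvScanM l 0 (pvRun "(" l : Nat) ((l.length : Int) - (pvRun ")" l.reverse : Nat)) 0 l.length).2))) := by
  unfold remove_extreme_parenthesis_alt
  rw [if_neg (by push_neg; exact ⟨hbal, by omega⟩)]

theorem pvAlt_ret (l : List String)
    (h : ¬ ((pvScanM l 0 (pvRun "(" l : Nat) ((l.length : Int) - (pvRun ")" l.reverse : Nat)) 0 l.length).1 = 0 ∧
        1 ≤ (pvScanM l 0 (pvRun "(" l : Nat) ((l.length : Int) - (pvRun ")" l.reverse : Nat)) 0 l.length).2)) :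
    remove_extreme_parenthesis_alt l = l := by
  unfold remove_extreme_parenthesis_alt
  rw [if_pos]
  push_neg at h
  by_cases h1 : (pvScanM l 0 (pvRun "(" l : Nat) ((l.length : Int) - (pvRun ")" l.reverse : Nat)) 0 l.length).1 = 0
  · right; have := h h1; omega
  · left; exact h1

-- slicing away 0 elements is the identity
theorem pvSliceAll (l : List String) : PySem.List.slice l (some 0) (some (l.length : Int)) = l := by
  simp [PySem.List.slice_zero_start, PySem.List.slice_to_natCast]

-- slicing one layer deeper commutes with dropping the enclosing parens
theorem pvSliceInner (x w : String) (mid : List String) (j : Nat) (h1 : 1 ≤ j) (h2 : j ≤ mid.length + 1) :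
    PySem.List.slice (x :: (mid ++ [w])) (some (j : Int)) (some (((mid.length + 2 - j : Nat)) : Int))
      = PySem.List.slice mid (some ((j - 1 : Nat) : Int)) (some (((mid.length - (j - 1) : Nat)) : Int)) := by
  rw [PySem.List.slice_natCast, PySem.List.slice_natCast]
  obtain ⟨j', rfl⟩ : ∃ j', j = j' + 1 := ⟨j - 1, by omega⟩
  simp only [List.drop_succ_cons, Nat.add_sub_cancel]
  rw [List.drop_append_of_le_length (by omega)]
  rw [List.take_append_of_le_length (by simp; omega)]
  congr 1
  omega

-- value_l[1:-1] for a list of the shape x :: mid ++ [w]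
theorem pvSliceTrim (x w : String) (mid : List String) :
    PySem.List.slice (x :: (mid ++ [w])) (some 1) (some (-1)) = mid := by
  simp [PySem.List.slice]

-- extracting A's loop hypothesis one element in
theorem pvLoopA_inner (mid : List String) (w : String)
    (hb : pvLoopA ("(" :: (mid ++ [w])) 0 0 (("(" :: (mid ++ [w])).length) = true) :
    pvLoopA (mid ++ [w]) 1 1 ((mid.length : Int) + 2) = true := by
  have hlen : (("(" :: (mid ++ [w])).length : Int) = (mid.length : Int) + 2 := by
    simp; push_cast; ring
  rw [pvLoopA_cons, hlen] at hb
  rw [if_neg (by simp [pvD]), if_neg (by simp [pvD]), zero_add] at hb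
  simpa [pvD] using hb

-- coupling invariant between the scans of "(" :: mid ++ [")"] and of mid
def pvR (n m1 m2 : Int) : Prop := (m1 = n ∧ m2 = n - 2) ∨ (1 ≤ m1 ∧ m1 = m2 + 1)

-- the two scans, one layer apart, stay coupled by pvR while A's loop succeeds
theorem pvScan_strip (mid : List String) :
    ∀ (w : String) (i b m1 m2 n P E : Int), 0 ≤ i → 1 ≤ b → b ≤ i + 1 → E ≤ n - 2 →
    n = i + 2 + mid.length →
    pvLoopA (mid ++ [w]) b (i + 1) n = true →
    pvR n m1 m2 →
    pvR n (pvScanM (mid ++ [w]) (i + 1) (P + 1) (E + 1) b m1).2 (pvScanM mid i P E (b - 1) m2).2 := by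
  induction mid with
  | nil =>
    intro w i b m1 m2 n P E hi hb hbi hE hn ht hR
    simp only [List.length_nil, Nat.cast_zero, add_zero] at hn
    simp only [List.nil_append] at ht ⊢
    rw [pvScanM_cons]
    rw [if_neg (by omega : ¬ (P + 1 ≤ i + 1 ∧ i + 1 < E + 1))]
    simpa [pvScanM] using hR
  | cons u ms ih =>
    intro w i b m1 m2 n P E hi hb hbi hE hn ht hR
    simp only [List.length_cons] at hn
    simp only [List.cons_append] at ht ⊢
    rw [pvLoopA_cons] at ht
    have hnot1 : ¬ (b + pvD u = 0 ∧ (i:Int) + 1 = n - 1) := by push_cast at hn; omega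
    rw [if_neg hnot1] at ht
    have hcne : ¬ (b + pvD u = 0) := by
      intro h0; rw [if_pos h0] at ht; simp at ht
    rw [if_neg hcne] at ht
    have hdb := pvD_bounds u
    have hcge : 1 ≤ b + pvD u := by omega
    have hcle : b + pvD u ≤ i + 2 := by omega
    rw [pvScanM_cons (e := E + 1) (p := P + 1), pvScanM_cons (e := E) (p := P)]
    have hδ : (b - 1) + pvD u = (b + pvD u) - 1 := by ring
    rw [hδ]
    have hlen : (0:Int) ≤ (ms.length : Int) := by positivity
    have hR' : pvR n
        (if P + 1 ≤ i + 1 ∧ i + 1 < E + 1 then min m1 (b + pvD u) else m1)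
        (if P ≤ i ∧ i < E then min m2 (b + pvD u - 1) else m2) := by
      by_cases hc : P ≤ i ∧ i < E
      · rw [if_pos (by omega), if_pos hc]
        rcases hR with ⟨e1, e2⟩ | ⟨h1, h2⟩
        · right
          constructor
          · rw [e1]; push_cast at hn; omega
          · rw [e1, e2]; push_cast at hn; omega
        · right; constructor <;> omega
      · rw [if_neg (by omega), if_neg hc]
        exact hR
    exact ih w (i + 1) (b + pvD u) _ _ n P E (by omega) hcge (by omega) hE
      (by push_cast at hn ⊢; omega) ht hR'

-- the first scanned element of "(" :: … lies left of the window and just sets the balance to 1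
theorem pvScan_head (rest : List String) (P E m : Int) (hP : 1 ≤ P) :
    pvScanM ("(" :: rest) 0 P E 0 m = pvScanM rest 1 P E 1 m := by
  rw [pvScanM_cons]
  rw [if_neg (by omega : ¬ (P ≤ 0 ∧ (0:Int) < E))]
  simp [pvD]

-- B strips exactly one layer when A's loop says so
theorem pvAlt_strip (mid : List String) (hm : mid ≠ [])
    (htrue : pvLoopA ("(" :: (mid ++ [")"])) 0 0 (("(" :: (mid ++ [")"])).length) = true) :
    remove_extreme_parenthesis_alt ("(" :: (mid ++ [")"])) = remove_extreme_parenthesis_alt mid := by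
  set L := mid.length with hLdef
  have hL1 : 1 ≤ L := List.length_pos_iff.mpr hm
  set l := "(" :: (mid ++ [")"]) with hldef
  have hlenN : l.length = L + 2 := by simp [hldef, hLdef]
  set n : Int := (L : Int) + 2 with hndef
  have hlen : (l.length : Int) = n := by rw [hlenN]; push_cast; ring
  -- run lengths
  have hp : pvRun "(" l = pvRun "(" mid + 1 := by
    rw [hldef]
    simp [pvRun, pvRun_append_ne "(" ")" (by decide) mid]
  have hq : pvRun ")" l.reverse = pvRun ")" mid.reverse + 1 := by
    have : l.reverse = ")" :: (mid.reverse ++ ["("]) := by simp [hldef]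
    rw [this]
    simp [pvRun, pvRun_append_ne ")" "(" (by decide) mid.reverse]
  have hpb : pvRun "(" mid ≤ L := pvRun_le_length _ _
  have hqb : pvRun ")" mid.reverse ≤ L := by simpa using pvRun_le_length ")" mid.reverse
  set P : Int := ((pvRun "(" mid : Nat) : Int) with hPdef
  set Q : Int := ((pvRun ")" mid.reverse : Nat) : Int) with hQdef
  set E : Int := (n - 2) - Q with hEdef
  -- loop hypothesis one element in
  have hin : pvLoopA (mid ++ [")"]) 1 1 n = true := pvLoopA_inner mid ")" htrue
  -- balance facts from the loop
  have hchar := pvLoopA_true_char (mid ++ [")"]) 1 1 n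
    (by simp only [List.length_append, List.length_cons, List.length_nil, hndef, hLdef]
        push_cast; ring)
    (by norm_num) hin
  have hbalmid : pvBal mid = 0 := by
    have h := hchar.1
    rw [pvBal_append, pvBal_cons, pvBal_nil, show pvD ")" = -1 by decide] at h
    omega
  -- the coupled scans
  have hcoup := pvScan_strip mid ")" 0 1 n (n - 2) n P E (le_refl 0) (by norm_num)
    (by norm_num) (by omega) (by rw [hndef, hLdef]; ring) (by simpa using hin) (Or.inl ⟨rfl, rfl⟩)
  -- rewrite both sides of the goal
  have hsl : pvScanM l 0 (pvRun "(" l : Nat) ((l.length : Int) - (pvRun ")" l.reverse : Nat)) 0 (l.length) =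
      pvScanM (mid ++ [")"]) 1 (P + 1) (E + 1) 1 n := by
    rw [hp, hq, hlen]
    have h1 : ((pvRun "(" mid + 1 : Nat) : Int) = P + 1 := by push_cast [hPdef]; ring
    have h2 : n - ((pvRun ")" mid.reverse + 1 : Nat) : Int) = E + 1 := by
      push_cast [hEdef, hQdef]; ring
    rw [hldef, h1, h2, pvScan_head _ _ _ _ (by rw [hPdef]; omega)]
  have hsm : pvScanM mid 0 (pvRun "(" mid : Nat) ((mid.length : Int) - (pvRun ")" mid.reverse : Nat)) 0 (mid.length) =
      pvScanM mid 0 P E 0 (n - 2) := by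
    have h2 : (mid.length : Int) - (pvRun ")" mid.reverse : Nat) = E := by
      rw [hEdef, hQdef, hndef, hLdef]; push_cast; ring
    have h3 : (mid.length : Int) = n - 2 := by rw [hndef, hLdef]; push_cast; ring
    rw [h2, ← hPdef, h3]
  -- balances of both scans are 0
  have hf1 : (pvScanM (mid ++ [")"]) 1 (P + 1) (E + 1) 1 n).1 = 0 := by
    rw [pvScanM_fst, pvBal_append, pvBal_cons, pvBal_nil, hbalmid]; simp [pvD]
  have hf2 : (pvScanM mid 0 P E 0 (n - 2)).1 = 0 := by
    rw [pvScanM_fst, hbalmid]; ring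
  set M1 := (pvScanM (mid ++ [")"]) 1 (P + 1) (E + 1) 1 n).2 with hM1
  set M2 := (pvScanM mid 0 P E 0 (n - 2)).2 with hM2
  have hRf : pvR n M1 M2 := by
    have h01 : ((0:Int) - 1) = -1 := by norm_num
    simpa [hM1, hM2] using hcoup
  have hM1pos : 1 ≤ M1 := by
    rcases hRf with ⟨e1, _⟩ | ⟨h1, _⟩
    · omega
    · exact h1
  -- left side: slice branch with k = min (P+1) (min (Q+1) M1)
  rw [pvAlt_sliceK l (by rw [hsl]; exact hf1) (by rw [hsl]; exact hM1pos)]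
  rw [hsl, ← hM1, hp, hq, hlen]
  have hc1 : ((pvRun "(" mid + 1 : Nat) : Int) = P + 1 := by push_cast [hPdef]; ring
  have hc2 : ((pvRun ")" mid.reverse + 1 : Nat) : Int) = Q + 1 := by push_cast [hQdef]; ring
  rw [hc1, hc2]
  by_cases hM2pos : 1 ≤ M2
  · -- right side also slices, one layer shallower
    rw [pvAlt_sliceK mid (by rw [hsm]; exact hf2) (by rw [hsm]; exact hM2pos)]
    rw [hsm, ← hM2, ← hPdef]
    have hcq : ((pvRun ")" mid.reverse : Nat) : Int) = Q := by rw [hQdef]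
    rw [hcq]
    set k2 := min P (min Q M2) with hk2
    have hk1 : min (P + 1) (min (Q + 1) M1) = k2 + 1 := by
      rcases hRf with ⟨e1, e2⟩ | ⟨h1, h2⟩
      · rw [hk2, e1, e2]
        have hPn : P ≤ n - 2 := by rw [hPdef, hndef, hLdef]; push_cast; omega
        have hQn : Q ≤ n - 2 := by rw [hQdef, hndef, hLdef]; push_cast; omega
        omega
      · rw [hk2, h2]; omega
    rw [hk1]
    have hk2n : 0 ≤ k2 := by
      have h0P : 0 ≤ P := by rw [hPdef]; positivity
      have h0Q : 0 ≤ Q := by rw [hQdef]; positivity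
      rw [hk2]; omega
    set j := (k2 + 1).toNat with hj
    have hjeq : (j : Int) = k2 + 1 := Int.toNat_of_nonneg (by omega)
    have hj1 : 1 ≤ j := by omega
    have hj2 : j ≤ L + 1 := by
      have : k2 ≤ Q := le_trans (min_le_right _ _) (min_le_left _ _)
      have hQL : Q ≤ (L:Int) := by rw [hQdef]; exact_mod_cast hqb
      omega
    have e1 : k2 + 1 = ((j : Nat) : Int) := hjeq.symm
    have e2 : n - (k2 + 1) = (((L + 2 - j : Nat)) : Int) := by push_cast; omega
    have e3 : k2 = (((j - 1 : Nat)) : Int) := by push_cast [hj1]; omega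
    have e4 : n - 2 - k2 = (((L - (j - 1) : Nat)) : Int) := by
      have : j - 1 ≤ L := by omega
      push_cast [this, hj1]; omega
    rw [hldef, e2, e1]
    have := pvSliceInner "(" ")" mid j hj1 hj2
    rw [hLdef] at e4 ⊢
    rw [this, ← e3, ← e4]
    have h3 : (mid.length : Int) = n - 2 := by rw [hndef, hLdef]; push_cast; ring
    rw [h3]
  · -- right side returns mid; the layer count is exactly 1
    rw [pvAlt_ret mid (by rw [hsm, ← hM2]; intro ⟨_, h⟩; exact hM2pos h)]
    have hM1one : M1 = 1 := by
      rcases hRf with ⟨e1, e2⟩ | ⟨h1, h2⟩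
      · exfalso; apply hM2pos; rw [e2, hndef]; push_cast; omega
      · omega
    have hPge : 0 ≤ P := by rw [hPdef]; positivity
    have hQge : 0 ≤ Q := by rw [hQdef]; positivity
    have hk1 : min (P + 1) (min (Q + 1) M1) = 1 := by rw [hM1one]; omega
    rw [hk1]
    have e1 : (1:Int) = ((1 : Nat) : Int) := by norm_num
    have e2 : n - 1 = (((L + 2 - 1 : Nat)) : Int) := by push_cast; omega
    rw [hldef, e2, e1]
    rw [pvSliceInner "(" ")" mid 1 (le_refl 1) (by omega)]
    norm_num [pvSliceAll]

-- when A's loop fails on a "("-headed list, B returns the input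
theorem pvAlt_of_loop_false (v : String) (rs : List String)
    (hf : pvLoopA (v :: rs) 0 0 ((v :: rs).length) = false) :
    remove_extreme_parenthesis_alt (v :: rs) = v :: rs := by
  set l := v :: rs with hldef
  apply pvAlt_ret
  rintro ⟨h1, h2⟩
  rw [pvScanM_fst] at h1
  simp only [zero_add] at h1
  -- balance is 0, so the loop must have hit 0 early
  have := pvLoopA_false_char rs v 0 0 (l.length) (by simp [hldef]; push_cast; ring)
    (by simpa [hldef] using hf)
  rcases this with h | ⟨j, hj, hje⟩
  · exact h (by rw [← hldef] at *; simpa using h1)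
  · rw [zero_add, ← hldef] at hje
    -- the breakpoint lies inside the window [p, n - q)
    have hjlen : j < l.length := by simp [hldef]; omega
    have hjp : (pvRun "(" l : Nat) ≤ j := by
      by_contra hlt
      push_neg at hlt
      have := pvRun_prefix l j hlt
      rw [hje] at this
      push_cast at this
      omega
    have hjq : (j : Int) < (l.length : Int) - (pvRun ")" l.reverse : Nat) := by
      by_contra hge
      push_neg at hge
      have hq_le : pvRun ")" l.reverse ≤ l.length := by
        simpa using pvRun_le_length ")" l.reverse
      have hjn : j + 1 < l.length := by simp only [hldef, List.length_cons]; omega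
      have htq : l.length - (j + 1) ≤ pvRun ")" l.reverse := by push_cast at hge; omega
      have hdrop := pvRun_suffix l (l.length - (j + 1)) htq
      have hlt : l.length - (l.length - (j + 1)) = j + 1 := by omega
      rw [hlt] at hdrop
      have hsplit : pvBal (l.take (j + 1)) + pvBal (l.drop (j + 1)) = 0 := by
        rw [← pvBal_append, List.take_append_drop, h1]
      rw [hdrop, pvBal_replicate_close, hje] at hsplit
      push_cast at hsplit
      omega
    have := pvScanM_le_at l j 0 (pvRun "(" l : Nat) ((l.length : Int) - (pvRun ")" l.reverse : Nat))
      0 (l.length) hjlen (by push_cast; omega) (by push_cast at hjq ⊢; omega)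
    rw [hje] at this
    simp at this
    omega

-- when the head is not "(", B returns the input
theorem pvAlt_of_head_ne (v : String) (rs : List String) (hv : v ≠ "(") :
    remove_extreme_parenthesis_alt (v :: rs) = v :: rs := by
  set l := v :: rs with hldef
  have hp : pvRun "(" l = 0 := by simp [hldef, pvRun, hv]
  by_cases hc : (pvScanM l 0 (pvRun "(" l : Nat) ((l.length : Int) - (pvRun ")" l.reverse : Nat)) 0 l.length).1 = 0 ∧
      1 ≤ (pvScanM l 0 (pvRun "(" l : Nat) ((l.length : Int) - (pvRun ")" l.reverse : Nat)) 0 l.length).2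
  · rw [pvAlt_sliceK l hc.1 hc.2]
    have hk : min ((pvRun "(" l : Nat) : Int) (min ((pvRun ")" l.reverse : Nat) : Int)
        (pvScanM l 0 (pvRun "(" l : Nat) ((l.length : Int) - (pvRun ")" l.reverse : Nat)) 0 l.length).2) = 0 := by
      have h2 := hc.2
      rw [hp] at h2 ⊢
      simp only [Nat.cast_zero] at h2 ⊢
      have h1 : (0:Int) ≤ ((pvRun ")" l.reverse : Nat) : Int) := by positivity
      omega
    rw [hk]
    simpa using pvSliceAll l
  · exact pvAlt_ret l hc

theorem pvMain : ∀ (N : Nat) (l : List String), l.length ≤ N →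
    Pre_remove_extreme_parenthesis l →
    remove_extreme_parenthesis l = remove_extreme_parenthesis_alt l := by
  intro N
  induction N with
  | zero =>
    intro l hl hp
    have : l = [] := List.eq_nil_of_length_eq_zero (by omega)
    subst this
    exact absurd ⟨rfl, by simp⟩ hp
  | succ N ih =>
    intro l hl hp
    match l with
    | [] => exact absurd ⟨rfl, by simp⟩ hp
    | v :: rs =>
      by_cases hv : v = "("
      · by_cases hb : pvLoopA (v :: rs) 0 0 ((v :: rs).length) = true
        · -- strip case: A recurses on value_l[1:-1]; B counts this layer
          subst hv
          rcases List.eq_nil_or_concat rs with hrs | ⟨mid, w, hcat⟩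
          · subst hrs
            rw [pvLoopA_cons] at hb
            simp [pvD, pvLoopA] at hb
          · rw [List.concat_eq_append] at hcat
            subst hcat
            -- the last element must be ")"
            have hin0 := pvLoopA_inner mid w hb
            have hchar := pvLoopA_true_char (mid ++ [w]) 1 1 ((mid.length : Int) + 2)
              (by simp only [List.length_append, List.length_cons, List.length_nil]
                  push_cast; ring)
              (by norm_num) hin0
            have hmid0 : 0 ≤ pvBal mid := by
              by_cases hmn : mid = []
              · subst hmn; simp [pvBal_nil]
              · have hlp : 1 ≤ mid.length := List.length_pos_iff.mpr hmn
                have h2 := hchar.2 (mid.length - 1)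
                  (by simp only [List.length_append, List.length_cons, List.length_nil]; omega)
                rw [show mid.length - 1 + 1 = mid.length by omega, List.take_left' rfl] at h2
                omega
            have hw : w = ")" := by
              apply pvD_close
              have hsum : pvBal (mid ++ [w]) = pvBal mid + pvD w := by
                rw [pvBal_append, pvBal_cons, pvBal_nil]; ring
              have h1 := hchar.1
              omega
            subst hw
            have hmne : mid ≠ [] := by
              intro e; subst e
              exact hp ⟨by simp, by simp [List.replicate]⟩
            have hAstep : remove_extreme_parenthesis ("(" :: (mid ++ [")"]))
                = remove_extreme_parenthesis mid := by
              rw [remove_extreme_parenthesis]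
              split
              · next heq => rw [PySem.List.pyGet?_zero_cons] at heq; exact absurd heq (by simp)
              · next u heq =>
                rw [PySem.List.pyGet?_zero_cons] at heq
                injection heq with heq; subst heq
                rw [if_neg (by simp), if_pos hb, pvSliceTrim]
            have hpm : Pre_remove_extreme_parenthesis mid := by
              rintro ⟨hev, hrep⟩
              apply hp
              have hlen2 : ("(" :: (mid ++ [")"])).length = mid.length + 2 := by simp
              constructor
              · rw [hlen2]; omega
              · rw [hlen2]
                have : (mid.length + 2) / 2 = mid.length / 2 + 1 := by omega
                rw [this]
                conv_lhs => rw [hrep]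
                rw [List.replicate_succ, List.replicate_succ']
                simp
            rw [hAstep, ih mid (by simp at hl; omega) hpm]
            exact (pvAlt_strip mid hmne hb).symm
        · -- A's loop breaks or falls through: both sides return the input
          have hA : remove_extreme_parenthesis (v :: rs) = v :: rs := by
            rw [remove_extreme_parenthesis]
            split
            · rfl
            · next u heq =>
              rw [PySem.List.pyGet?_zero_cons] at heq
              injection heq with heq; subst heq
              rw [if_neg (by simp [hv]), if_neg hb]
          rw [hA, pvAlt_of_loop_false v rs (by simpa using hb)]
      · -- first element is not "(": both sides return the input
        have hA : remove_extreme_parenthesis (v :: rs) = v :: rs := by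
          rw [remove_extreme_parenthesis]
          split
          · rfl
          · next u heq =>
            rw [PySem.List.pyGet?_zero_cons] at heq
            injection heq with heq; subst heq
            rw [if_pos hv]
        rw [hA, pvAlt_of_head_ne v rs hv]

-- ===== VERDICT (by name: the statement is the Claim_ definition above) =====
theorem remove_extreme_parenthesis_spec : Claim_equal_remove_extreme_parenthesis := by
  intro l _ hpre
  unfold Spec_remove_extreme_parenthesis
  exact pvMain l.length l le_rfl hpre
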